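-- pv_equiv track=rewrite | github.com/busebd12/InterviewPreparation | LeetCode/Python/Medium/2483-Minimum-Penalty-for-a-Shop/solution.py | get_number_of_yes
-- ===== SOURCE A (Python) =====
-- from typing import List
--
-- def get_number_of_yes(customers: str, n: int) -> List[int]:
--     number_of_yes: List[int]=[0] * (n + 1)
--
--     count: int=0
--
--     for index in range(n-1, -1, -1):
--         if customers[index]=='Y':
--             number_of_yes[index]=(count + 1)
--
--             count+=1
--         else:
--             number_of_yes[index]=count
--
--     return number_of_yes
-- ===== SOURCE B (Python) =====
-- from typing import List
--
-- def get_number_of_yes(customers: str, n: int) -> List[int]: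
--     total = 0
--     for i in range(n):
--         if customers[i] == 'Y':
--             total += 1
--     result = [0] * (n + 1)
--     prefix = 0
--     for i in range(n):
--         result[i] = total - prefix
--         if customers[i] == 'Y':
--             prefix += 1
--     return result
-- ===== Notes on version B (the rewrite author's own statement) =====
-- stated objective: alternative
-- what changed: Replaces A's single backward suffix-accumulation pass with two forward passes: one counts the total number of 'Y' in positions 0..n-1, the second fills result[i] = total minus the running prefix count of 'Y' before i.
import Mathlib
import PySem

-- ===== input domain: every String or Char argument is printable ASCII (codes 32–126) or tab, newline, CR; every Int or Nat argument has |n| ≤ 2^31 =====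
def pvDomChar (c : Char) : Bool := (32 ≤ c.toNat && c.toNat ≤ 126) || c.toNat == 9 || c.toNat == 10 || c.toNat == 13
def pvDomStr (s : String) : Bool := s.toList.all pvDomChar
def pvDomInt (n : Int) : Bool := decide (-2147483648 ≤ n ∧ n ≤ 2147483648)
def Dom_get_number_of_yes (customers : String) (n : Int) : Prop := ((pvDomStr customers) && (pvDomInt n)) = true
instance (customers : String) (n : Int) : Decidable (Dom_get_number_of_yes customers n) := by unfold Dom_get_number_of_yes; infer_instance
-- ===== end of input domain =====

-- B replaces A's backward suffix-accumulation with two forward passes (total minus a running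
-- prefix count); same O(n) cost, alternative decomposition. Equivalence is proved on Pre_
-- (n ≤ len(customers), exactly where A returns instead of raising IndexError).

-- ===== PORT A =====
def get_number_of_yes (customers : String) (n : Int) : List Int :=
  -- [0] * (n + 1)
  let number_of_yes : List Int := List.replicate (n + 1).toNat 0
  -- for index in range(n-1, -1, -1): ...   (index is always ≥ 0 here, so .toNat is exact)
  let st := (PySem.List.pyRange (n - 1) (-1) (-1)).foldl
    (fun (st : List Int × Int) index =>
      if PySem.Str.pyGet? customers index = some 'Y' then
        (st.1.set index.toNat (st.2 + 1), st.2 + 1)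
      else
        (st.1.set index.toNat st.2, st.2))
    (number_of_yes, 0)
  st.1

-- ===== PORT B =====
def get_number_of_yes_alt (customers : String) (n : Int) : List Int :=
  -- first pass: total number of 'Y' among positions 0..n-1
  let total : Int := (PySem.List.pyRange 0 n 1).foldl
    (fun t i => if PySem.Str.pyGet? customers i = some 'Y' then t + 1 else t) 0
  -- result = [0] * (n + 1)
  let result : List Int := List.replicate (n + 1).toNat 0
  -- second pass: result[i] = total - prefix; prefix counts 'Y' seen so far (i ≥ 0, .toNat exact)
  let st := (PySem.List.pyRange 0 n 1).foldl
    (fun (st : List Int × Int) i =>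
      (st.1.set i.toNat (total - st.2),
       if PySem.Str.pyGet? customers i = some 'Y' then st.2 + 1 else st.2))
    (result, 0)
  st.1

-- ===== PRECONDITION & SPEC =====
-- Pre_ excludes exactly the inputs where A raises IndexError (indexing customers[n-1] with n > len).
def Pre_get_number_of_yes (customers : String) (n : Int) : Prop :=
  n ≤ (customers.toList.length : Int)
instance (customers : String) (n : Int) : Decidable (Pre_get_number_of_yes customers n) := by
  unfold Pre_get_number_of_yes; infer_instance

def pvWitness_get_number_of_yes : String × Int := ("YNYY", 3)

def Spec_get_number_of_yes (customers : String) (n : Int) (out : List Int) : Prop := out = get_number_of_yes_alt customers n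
instance (customers : String) (n : Int) (out : List Int) : Decidable (Spec_get_number_of_yes customers n out) := by unfold Spec_get_number_of_yes; infer_instance

-- ===== CLAIM (what is proved, stated in full; the proofs are below) =====
def Claim_equal_get_number_of_yes : Prop := ∀ (customers : String) (n : Int), Dom_get_number_of_yes customers n → Pre_get_number_of_yes customers n → Spec_get_number_of_yes customers n (get_number_of_yes customers n)

-- ===== LEMMAS AND PROOFS =====

-- suffix count of 'Y' in cs within positions [i, m)
def sufY (cs : List Char) (m i : Nat) : Int := (((cs.take m).drop i).count 'Y' : Int)

theorem sufY_self (cs : List Char) (m : Nat) : sufY cs m m = 0 := by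
  simp [sufY, List.drop_eq_nil_of_le (List.length_take_le m cs)]

theorem sufY_step (cs : List Char) (m j : Nat) (hj : j < m) (hm : m ≤ cs.length) :
    sufY cs m j = sufY cs m (j + 1) + (if cs.get ⟨j, by omega⟩ = 'Y' then 1 else 0) := by
  have hjlen : j < (cs.take m).length := by simp; omega
  have hdrop : (cs.take m).drop j = (cs.take m)[j] :: (cs.take m).drop (j + 1) :=
    List.drop_eq_getElem_cons hjlen
  have hget : (cs.take m)[j] = cs[j]'(by omega) := List.getElem_take
  simp only [sufY, hdrop, List.count_cons, hget, List.get_eq_getElem]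
  by_cases hY : cs[j]'(by omega) = 'Y'
  · simp [hY]
  · simp [hY]

theorem pyGetY (cs : List Char) (j : Nat) (hj : j < cs.length) :
    PySem.List.pyGet? cs (j : Int) = some 'Y' ↔ cs[j] = 'Y' := by
  simp [PySem.List.pyGet?_natCast, List.getElem?_eq_getElem hj]

-- A's backward loop: processing indices j-1 … 0 on top of an already-correct tail
theorem foldA (cs : List Char) (m : Nat) (hm : m ≤ cs.length) :
    ∀ (j : Nat), j ≤ m → ∀ (tail : List Int),
    (PySem.List.pyRange ((j : Int) - 1) (-1) (-1)).foldl
      (fun (st : List Int × Int) index =>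
        if PySem.List.pyGet? cs index = some 'Y' then
          (st.1.set index.toNat (st.2 + 1), st.2 + 1)
        else
          (st.1.set index.toNat st.2, st.2))
      (List.replicate j 0 ++ tail, sufY cs m j)
    = ((List.range j).map (sufY cs m) ++ tail, sufY cs m 0) := by
  intro j
  induction j with
  | zero =>
    intro _ tail
    rw [PySem.List.pyRange_neg_one_eq_nil (by omega)]
    simp
  | succ j ih =>
    intro hjm tail
    have hj : j < m := by omega
    have hjlen : j < cs.length := by omega
    have e1 : ((j + 1 : Nat) : Int) - 1 = (j : Int) := by push_cast; ring
    rw [e1, PySem.List.pyRange_neg_one_cons (by omega)]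
    simp only [List.foldl_cons]
    have hset : ∀ v : Int, (List.replicate (j+1) (0:Int) ++ tail).set j v
        = List.replicate j 0 ++ v :: tail := by
      intro v
      rw [List.replicate_succ' , List.append_assoc]
      rw [List.set_append_right _ _ (by simp)]
      simp
    have hstep := sufY_step cs m j hj hm
    by_cases hY : cs[j] = 'Y'
    · rw [if_pos ((pyGetY cs j hjlen).mpr hY)]
      simp only [Int.toNat_natCast]
      rw [hset]
      have h1 : sufY cs m (j+1) + 1 = sufY cs m j := by
        rw [hstep]; simp [hY]
      rw [h1, ih (by omega) (sufY cs m j :: tail)]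
      simp [List.range_succ]
    · rw [if_neg (fun hc => hY ((pyGetY cs j hjlen).mp hc))]
      simp only [Int.toNat_natCast]
      rw [hset]
      have h1 : sufY cs m (j+1) = sufY cs m j := by
        rw [hstep]; simp [hY]
      rw [h1, ih (by omega) (sufY cs m j :: tail)]
      simp [List.range_succ]

-- B's total pass counts all of 'Y' in positions [j, m)
theorem foldTotal (cs : List Char) (m : Nat) (hm : m ≤ cs.length) :
    ∀ (k j : Nat), j + k = m → ∀ (t : Int),
    (PySem.List.pyRange (j : Int) (m : Int) 1).foldl
      (fun t i => if PySem.List.pyGet? cs i = some 'Y' then t + 1 else t) t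
    = t + sufY cs m j := by
  intro k
  induction k with
  | zero =>
    intro j hj t
    subst hj
    rw [PySem.List.pyRange_one_eq_nil (by omega)]
    simp [sufY_self]
  | succ k ih =>
    intro j hj t
    have hjlen : j < cs.length := by omega
    rw [PySem.List.pyRange_one_cons (by omega)]
    simp only [List.foldl_cons]
    rw [show ((j : Int) + 1) = ((j + 1 : Nat) : Int) by push_cast; ring]
    rw [ih (j+1) (by omega)]
    rw [sufY_step cs m j (by omega) hm]
    by_cases hY : cs[j] = 'Y'
    · rw [if_pos ((pyGetY cs j hjlen).mpr hY)]
      simp [hY]; ring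
    · rw [if_neg (fun hc => hY ((pyGetY cs j hjlen).mp hc))]
      simp [hY]

-- B's filling loop
theorem foldB (cs : List Char) (m : Nat) (hm : m ≤ cs.length) :
    ∀ (k j : Nat), j + k = m → ∀ (front : List Int), front.length = j →
    (PySem.List.pyRange (j : Int) (m : Int) 1).foldl
      (fun (st : List Int × Int) i =>
        (st.1.set i.toNat (sufY cs m 0 - st.2),
         if PySem.List.pyGet? cs i = some 'Y' then st.2 + 1 else st.2))
      (front ++ List.replicate k 0 ++ [0], sufY cs m 0 - sufY cs m j)
    = (front ++ (List.range k).map (fun t => sufY cs m (j + t)) ++ [0], sufY cs m 0) := by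
  intro k
  induction k with
  | zero =>
    intro j hj front hfront
    subst hj
    rw [PySem.List.pyRange_one_eq_nil (by omega)]
    simp [sufY_self]
  | succ k ih =>
    intro j hj front hfront
    have hjlen : j < cs.length := by omega
    rw [PySem.List.pyRange_one_cons (by omega)]
    simp only [List.foldl_cons, Int.toNat_natCast]
    have hset : (front ++ List.replicate (k+1) (0:Int) ++ [0]).set j (sufY cs m 0 - (sufY cs m 0 - sufY cs m j))
        = (front ++ [sufY cs m j]) ++ List.replicate k 0 ++ [0] := by
      rw [List.replicate_succ, List.append_assoc, List.append_assoc]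
      rw [List.set_append_right _ _ (by omega)]
      simp [hfront]
    rw [hset]
    have hstep := sufY_step cs m j (by omega) hm
    have hnext : ∀ p : Int,
        (if PySem.List.pyGet? cs (j:Int) = some 'Y' then p + 1 else p)
        = p + (if cs.get ⟨j, hjlen⟩ = 'Y' then 1 else 0) := by
      intro p
      simp only [pyGetY cs j hjlen, List.get_eq_getElem]
      split_ifs with h <;> simp
    rw [hnext]
    have hcount : sufY cs m 0 - sufY cs m j + (if cs.get ⟨j, hjlen⟩ = 'Y' then 1 else 0)
        = sufY cs m 0 - sufY cs m (j + 1) := by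
      rw [hstep]; ring
    rw [hcount]
    rw [show ((j : Int) + 1) = ((j + 1 : Nat) : Int) by push_cast; ring]
    rw [ih (j+1) (by omega) (front ++ [sufY cs m j]) (by simp [hfront])]
    have hmap : (List.range (k+1)).map (fun t => sufY cs m (j + t))
        = sufY cs m j :: (List.range k).map (fun t => sufY cs m (j + 1 + t)) := by
      rw [List.range_succ_eq_map]
      simp only [List.map_cons, List.map_map, Nat.add_zero]
      refine congrArg₂ _ (by simp) ?_
      apply List.map_congr_left
      intro t _
      simp only [Function.comp_apply]
      congr 1
      omega
    rw [hmap]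
    simp

-- the two main folds agree for 0 < n = m ≤ len
theorem main_eq (customers : String) (m : Nat) (hm : m ≤ customers.toList.length) :
    get_number_of_yes customers (m : Int) = get_number_of_yes_alt customers (m : Int) := by
  have hbridge : ∀ i, PySem.Str.pyGet? customers i = PySem.List.pyGet? customers.toList i := by
    intro i; simp
  unfold get_number_of_yes get_number_of_yes_alt
  simp only [hbridge]
  have hrep : ((m : Int) + 1).toNat = m + 1 := by omega
  rw [hrep]
  -- A side
  have hA := foldA customers.toList m hm m le_rfl [0]
  rw [sufY_self] at hA
  have hArw : (List.replicate (m+1) (0:Int)) = List.replicate m 0 ++ [0] :=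
    List.replicate_succ' ..
  -- B side: total
  have hT := foldTotal customers.toList m hm m 0 (by omega) 0
  rw [zero_add] at hT
  have hB := foldB customers.toList m hm m 0 (by omega) [] rfl
  simp only [Nat.cast_zero, sub_self, Nat.zero_add, List.nil_append] at hT hB
  simp only [hArw, hA, hT, hB]

-- ===== VERDICT (by name: the statement is the Claim_ definition above) =====
theorem get_number_of_yes_spec : Claim_equal_get_number_of_yes := by
  intro customers n _ hpre
  unfold Spec_get_number_of_yes
  by_cases hn : 0 ≤ n
  · lift n to ℕ using hn
    unfold Pre_get_number_of_yes at hpre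
    exact main_eq customers n (by exact_mod_cast hpre)
  · -- n < 0: both loops are empty, both return the (empty or singleton) zero list
    unfold get_number_of_yes get_number_of_yes_alt
    rw [PySem.List.pyRange_neg_one_eq_nil (by omega), PySem.List.pyRange_one_eq_nil (by omega)]
    simp
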